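-- pv_equiv track=rewrite | github.com/mattbradburyuk/aoc2024 | day25/day25.py | parse_lock
-- ===== SOURCE A (Python) =====
-- def parse_lock(grid):
--     lock = [0,0,0,0,0]
--     lines = grid.splitlines()
--     for line_ind, line in enumerate(lines):
--         for cha_ind, cha in enumerate(line):
--             if cha == '#':
--                 lock[cha_ind] = line_ind
--     return lock
-- ===== SOURCE B (Python) =====
-- def parse_lock(grid):
--     lines = grid.splitlines()
--     width = max((len(line) for line in lines), default=0)
--     lock = [0, 0, 0, 0, 0]
--     for c in range(width):
--         for i in range(len(lines) - 1, -1, -1):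
--             line = lines[i]
--             if c < len(line) and line[c] == '#':
--                 lock[c] = i
--                 break
--     return lock
-- ===== Notes on version B (the rewrite author's own statement) =====
-- stated objective: alternative
-- what changed: Replaces the row-major sweep that overwrites lock[c] on every '#' with an independent bottom-up scan of each column that stops at its first (i.e. last) '#'.
import Mathlib
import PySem

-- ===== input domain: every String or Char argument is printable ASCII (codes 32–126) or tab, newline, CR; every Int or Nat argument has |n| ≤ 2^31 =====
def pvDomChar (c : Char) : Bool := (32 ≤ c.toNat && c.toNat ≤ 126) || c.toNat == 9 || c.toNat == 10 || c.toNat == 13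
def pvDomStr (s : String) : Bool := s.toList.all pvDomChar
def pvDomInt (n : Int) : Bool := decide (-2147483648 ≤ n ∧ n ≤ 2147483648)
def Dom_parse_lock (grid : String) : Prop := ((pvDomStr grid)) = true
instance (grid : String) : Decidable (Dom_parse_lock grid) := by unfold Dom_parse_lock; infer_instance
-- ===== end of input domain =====

-- B replaces A's row-major overwrite sweep by an independent bottom-up scan of each column of the grid, breaking at the last '#'; same cost class, different traversal.

-- ===== PORT A =====
-- inner loop: for cha_ind, cha in enumerate(line): if cha == '#': lock[cha_ind] = line_ind
def plStep (lk : List Int) (il : Int × String) : List Int :=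
  (PySem.List.enumerate il.2.toList 0).foldl
    (fun lk jc => if jc.2 = '#' then PySem.List.pySetD lk jc.1 il.1 else lk) lk

def parse_lock (grid : String) : List Int :=
  (PySem.List.enumerate (PySem.Str.splitlines grid) 0).foldl plStep [0, 0, 0, 0, 0]

-- ===== PORT B =====
-- inner loop of Source B: for i in range(len(lines)-1,-1,-1): if c < len(line) and line[c]=='#': …; break
-- modelled as structural recursion over the reversed enumerated lines; 'c < len(line) and line[c]=='#'' is exactly toList[c]? = some '#'
def colFind (c : Nat) : List (Int × String) → Option Int
  | [] => none
  | (i, line) :: rest => if line.toList[c]? = some '#' then some i else colFind c rest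

-- width = max((len(line) for line in lines), default=0); len is exact as toList.length on the ASCII domain
def parse_lock_alt (grid : String) : List Int :=
  (List.range (((PySem.Str.splitlines grid).map (fun l => l.toList.length)).foldl max 0)).foldl
    (fun lk c =>
      match colFind c (PySem.List.enumerate (PySem.Str.splitlines grid) 0).reverse with
      | some i => PySem.List.pySetD lk c i   -- lock[c] = i (in range on Pre_)
      | none => lk)
    [0, 0, 0, 0, 0]

-- ===== PRECONDITION & SPEC =====
-- Pre_ excludes exactly the grids on which both programs raise IndexError: a line with '#' at column index ≥ 5.
def Pre_parse_lock (grid : String) : Prop :=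
  ∀ line ∈ PySem.Str.splitlines grid, '#' ∉ line.toList.drop 5
instance (grid : String) : Decidable (Pre_parse_lock grid) := by unfold Pre_parse_lock; infer_instance

def pvWitness_parse_lock : String := "#.#\n..##"

def Spec_parse_lock (grid : String) (out : List Int) : Prop := out = parse_lock_alt grid
instance (grid : String) (out : List Int) : Decidable (Spec_parse_lock grid out) := by unfold Spec_parse_lock; infer_instance

-- ===== CLAIM (what is proved, stated in full; the proofs are below) =====
def Claim_equal_parse_lock : Prop := ∀ (grid : String), Dom_parse_lock grid → Pre_parse_lock grid → Spec_parse_lock grid (parse_lock grid)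

-- ===== LEMMAS AND PROOFS =====

-- length preservation of the inner fold of A
lemma inner_len (i : Int) : ∀ (ps : List (Int × Char)) (lk : List Int),
    ((ps.foldl (fun lk jc => if jc.2 = '#' then PySem.List.pySetD lk jc.1 i else lk) lk).length)
      = lk.length := by
  intro ps
  induction ps with
  | nil => intro lk; rfl
  | cons p ps ih =>
    intro lk
    simp only [List.foldl_cons]
    rw [ih]
    split <;> simp [PySem.List.length_pySetD]

lemma plStep_len (lk : List Int) (il : Int × String) : (plStep lk il).length = lk.length := by
  simpa [plStep] using inner_len il.1 (PySem.List.enumerate il.2.toList 0) lk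

lemma fold_len : ∀ (es : List (Int × String)) (lk : List Int),
    (es.foldl plStep lk).length = lk.length := by
  intro es
  induction es with
  | nil => intro lk; rfl
  | cons e es ih => intro lk; simp only [List.foldl_cons]; rw [ih, plStep_len]

-- inner loop characterisation: entry c after A processes one line
lemma inner_get (i : Int) (chars : List Char) (lk : List Int) (c : Nat) :
    ((PySem.List.enumerate chars 0).foldl
        (fun lk jc => if jc.2 = '#' then PySem.List.pySetD lk jc.1 i else lk) lk)[c]? =
      if chars[c]? = some '#' ∧ c < lk.length then some i else lk[c]? := by
  induction chars using List.reverseRecOn with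
  | nil => simp [PySem.List.enumerate]
  | append_singleton cs ch ih =>
    rw [PySem.List.enumerate_append, List.foldl_append]
    have hNlen : ((PySem.List.enumerate cs 0).foldl
        (fun lk jc => if jc.2 = '#' then PySem.List.pySetD lk jc.1 i else lk) lk).length
        = lk.length := inner_len i _ lk
    set N := (PySem.List.enumerate cs 0).foldl
        (fun lk jc => if jc.2 = '#' then PySem.List.pySetD lk jc.1 i else lk) lk with hN
    simp only [PySem.List.enumerate_cons, PySem.List.enumerate_nil, List.foldl_cons, List.foldl_nil]
    rcases Nat.lt_trichotomy c cs.length with hlt | heq | hgt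
    · have hget : (cs ++ [ch])[c]? = cs[c]? := List.getElem?_append_left hlt
      by_cases hch : ch = '#'
      · rw [if_pos hch, PySem.List.pySetD_of_nonneg _ _ (by positivity)]
        have ht : ((0 : Int) + (cs.length : Int)).toNat = cs.length := by simp
        rw [ht, List.getElem?_set, if_neg (by omega), ih, hget]
      · rw [if_neg hch, ih, hget]
    · subst heq
      have hget : (cs ++ [ch])[cs.length]? = some ch := List.getElem?_concat_length
      have hcs : cs[cs.length]? = none := by simp
      by_cases hch : ch = '#'
      · rw [if_pos hch, PySem.List.pySetD_of_nonneg _ _ (by positivity)]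
        have ht : ((0 : Int) + (cs.length : Int)).toNat = cs.length := by simp
        rw [ht, List.getElem?_set, if_pos rfl, hNlen, hget, hch]
        by_cases hlen : cs.length < lk.length
        · rw [if_pos hlen, if_pos ⟨rfl, hlen⟩]
        · rw [if_neg hlen, if_neg (show ¬((some '#' : Option Char) = some '#' ∧ cs.length < lk.length) by tauto),
            List.getElem?_eq_none (by omega)]
      · rw [if_neg hch, ih, hcs, hget]
        have : ¬ (some ch = some '#') := by simpa using hch
        simp only [this, false_and, if_false]
        simp
    · have hget : (cs ++ [ch])[c]? = none := by
        rw [List.getElem?_append_right (by omega)]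
        have : 1 ≤ c - cs.length := by omega
        simp
        omega
      have hcs : cs[c]? = none := by simp; omega
      by_cases hch : ch = '#'
      · rw [if_pos hch, PySem.List.pySetD_of_nonneg _ _ (by positivity)]
        have ht : ((0 : Int) + (cs.length : Int)).toNat = cs.length := by simp
        rw [ht, List.getElem?_set, if_neg (by omega), ih, hcs, hget]
      · rw [if_neg hch, ih, hcs, hget]

-- A's whole fold, characterised through B's column scan
lemma main_get (lines : List String) (lk : List Int) (c : Nat) (hc : c < lk.length) :
    ((PySem.List.enumerate lines 0).foldl plStep lk)[c]? =
      match colFind c (PySem.List.enumerate lines 0).reverse with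
      | some i => some i
      | none => lk[c]? := by
  induction lines using List.reverseRecOn with
  | nil => simp [PySem.List.enumerate, colFind]
  | append_singleton ls s ih =>
    rw [PySem.List.enumerate_append, List.foldl_append]
    have hFlen : ((PySem.List.enumerate ls 0).foldl plStep lk).length = lk.length :=
      fold_len _ lk
    set M := (PySem.List.enumerate ls 0).foldl plStep lk with hM
    simp only [PySem.List.enumerate_cons, PySem.List.enumerate_nil, List.foldl_cons, List.foldl_nil]
    rw [show (plStep M (0 + (ls.length : Int), s))[c]? =
        if s.toList[c]? = some '#' ∧ c < M.length then some (0 + (ls.length : Int)) else M[c]? from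
      inner_get _ _ _ _]
    rw [List.reverse_append]
    simp only [List.reverse_cons, List.reverse_nil, List.nil_append, List.cons_append, colFind]
    by_cases hs : s.toList[c]? = some '#'
    · rw [if_pos ⟨hs, by omega⟩, if_pos hs]
    · rw [if_neg (by tauto), if_neg hs, ih]

-- colFind yields none when no line hits column c
lemma colFind_none (c : Nat) : ∀ (es : List (Int × String)),
    (∀ p ∈ es, p.2.toList[c]? ≠ some '#') → colFind c es = none := by
  intro es
  induction es with
  | nil => intro _; rfl
  | cons p ps ih =>
    intro h
    obtain ⟨i, line⟩ := p
    simp only [colFind]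
    rw [if_neg (h (i, line) (List.mem_cons_self))]
    exact ih (fun q hq => h q (List.mem_cons_of_mem _ hq))

-- colFind = some i only if some line hits column c
lemma colFind_mem (c : Nat) : ∀ (es : List (Int × String)) (i : Int),
    colFind c es = some i → ∃ p ∈ es, p.2.toList[c]? = some '#' := by
  intro es
  induction es with
  | nil => intro i h; exact absurd h (by simp [colFind])
  | cons p ps ih =>
    intro i h
    obtain ⟨j, line⟩ := p
    simp only [colFind] at h
    by_cases hs : line.toList[c]? = some '#'
    · exact ⟨(j, line), List.mem_cons_self, hs⟩
    · rw [if_neg hs] at h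
      obtain ⟨q, hq, hq2⟩ := ih i h
      exact ⟨q, List.mem_cons_of_mem _ hq, hq2⟩

lemma foldl_max_init : ∀ (xs : List Nat) (a : Nat), a ≤ xs.foldl max a := by
  intro xs
  induction xs with
  | nil => intro a; exact le_refl a
  | cons x xs ih => intro a; exact le_trans (le_max_left a x) (ih (max a x))

lemma foldl_max_mem : ∀ (xs : List Nat) (a b : Nat), b ∈ xs → b ≤ xs.foldl max a := by
  intro xs
  induction xs with
  | nil => intro a b h; cases h
  | cons x xs ih =>
    intro a b h
    rcases List.mem_cons.mp h with h | h
    · subst h; exact le_trans (le_max_right a b) (foldl_max_init xs (max a b))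
    · exact ih (max a x) b h

-- B's fold, characterised at entry c, assuming every hit column is < 5 (from Pre_)
lemma alt_get (lines : List String) (c : Nat)
    (H : ∀ (c' : Nat) (i : Int), colFind c' (PySem.List.enumerate lines 0).reverse = some i → c' < 5) :
    ∀ (w : Nat) (lk : List Int), lk.length = 5 →
    (((List.range w).foldl
      (fun lk c =>
        match colFind c (PySem.List.enumerate lines 0).reverse with
        | some i => PySem.List.pySetD lk c i
        | none => lk) lk).length = 5 ∧
    ((List.range w).foldl
      (fun lk c =>
        match colFind c (PySem.List.enumerate lines 0).reverse with
        | some i => PySem.List.pySetD lk c i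
        | none => lk) lk)[c]? =
      if c < w then
        match colFind c (PySem.List.enumerate lines 0).reverse with
        | some i => some i
        | none => lk[c]?
      else lk[c]?) := by
  intro w
  induction w with
  | zero => intro lk hlk; exact ⟨hlk, by simp⟩
  | succ w ih =>
    intro lk hlk
    obtain ⟨ihlen, ihget⟩ := ih lk hlk
    rw [List.range_succ]
    simp only [List.foldl_append, List.foldl_cons, List.foldl_nil]
    set F := (List.range w).foldl
      (fun lk c =>
        match colFind c (PySem.List.enumerate lines 0).reverse with
        | some i => PySem.List.pySetD lk c i
        | none => lk) lk with hF
    rcases h : colFind w (PySem.List.enumerate lines 0).reverse with _ | i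
    · -- none: column w unchanged
      refine ⟨ihlen, ?_⟩
      rw [ihget]
      by_cases hcw : c = w
      · subst hcw
        rw [if_neg (lt_irrefl c), if_pos (Nat.lt_succ_self c), h]
      · by_cases hlt : c < w
        · rw [if_pos hlt, if_pos (by omega)]
        · rw [if_neg hlt, if_neg (by omega)]
    · -- some i: lock[w] = i, in range since H gives w < 5
      have hw5 : w < 5 := H w i h
      have hset : PySem.List.pySetD F w i = F.set w i :=
        PySem.List.pySetD_of_nonneg _ _ (by positivity)
      refine ⟨?_, ?_⟩
      · show (PySem.List.pySetD F (w : Int) i).length = 5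
        rw [hset]; simp [ihlen]
      · show (PySem.List.pySetD F (w : Int) i)[c]? = _
        rw [hset]
        by_cases hcw : c = w
        · subst hcw
          rw [List.getElem?_set, if_pos rfl, ihlen, if_pos hw5, if_pos (Nat.lt_succ_self c), h]
        · rw [List.getElem?_set, if_neg (by omega), ihget]
          by_cases hlt : c < w
          · rw [if_pos hlt, if_pos (by omega)]
          · rw [if_neg hlt, if_neg (by omega)]

-- ===== VERDICT (by name: the statement is the Claim_ definition above) =====
theorem parse_lock_spec : Claim_equal_parse_lock := by
  intro grid _ hpre
  unfold Spec_parse_lock parse_lock parse_lock_alt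
  set lines := PySem.Str.splitlines grid with hl
  set width := (lines.map (fun l => l.toList.length)).foldl max 0 with hw
  -- hits are always in lines, so Pre_ bounds every hit column by 5
  have H : ∀ (c' : Nat) (i : Int),
      colFind c' (PySem.List.enumerate lines 0).reverse = some i → c' < 5 := by
    intro c' i h
    obtain ⟨p, hp, hhit⟩ := colFind_mem c' _ i h
    have hmem : p ∈ PySem.List.enumerate lines 0 := List.mem_reverse.mp hp
    have hp2 : p.2 ∈ lines := by
      have := List.mem_map_of_mem (f := (·.2)) hmem
      rwa [PySem.List.map_snd_enumerate] at this
    by_contra hge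
    have hd : (p.2.toList.drop 5)[c' - 5]? = some '#' := by
      rw [List.getElem?_drop, show 5 + (c' - 5) = c' by omega]
      exact hhit
    exact hpre p.2 hp2 (List.mem_of_getElem? hd)
  apply List.ext_getElem?
  intro c
  obtain ⟨hlen5, hget⟩ := alt_get lines c H width [0, 0, 0, 0, 0] rfl
  by_cases hc : c < 5
  · rw [main_get lines [0, 0, 0, 0, 0] c (by simpa using hc), hget]
    have h0 : ([0, 0, 0, 0, 0] : List Int)[c]? = some 0 := by interval_cases c <;> rfl
    by_cases hcw : c < width
    · rw [if_pos hcw]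
    · rw [if_neg hcw]
      have hnone : colFind c (PySem.List.enumerate lines 0).reverse = none := by
        apply colFind_none
        intro p hp hhit
        have hmem : p ∈ PySem.List.enumerate lines 0 := List.mem_reverse.mp hp
        have hp2 : p.2 ∈ lines := by
          have := List.mem_map_of_mem (f := (·.2)) hmem
          rwa [PySem.List.map_snd_enumerate] at this
        have hwide : p.2.toList.length ≤ width :=
          foldl_max_mem _ 0 _ (List.mem_map_of_mem hp2)
        have : p.2.toList[c]? = none := List.getElem?_eq_none (by omega)
        rw [this] at hhit
        simp at hhit
      rw [hnone]
  · rw [List.getElem?_eq_none (by rw [fold_len]; simp; omega),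
      List.getElem?_eq_none (by rw [hlen5]; omega)]
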